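-- pv_equiv track=rewrite | github.com/FilipeFKmg/Projecto | Codigo/epo_api_v2.py | _deduplicate_by_family
-- ===== SOURCE A (Python) =====
-- COUNTRY_PRIORITY = {
--     'US': 1, 'EP': 2, 'WO': 3, 'GB': 4,
--     'AU': 5, 'CA': 6, 'NZ': 7, 'IE': 8,
-- }
--
-- def _deduplicate_by_family(id_records: list) -> list:
--     """
--     Recebe uma lista de dicts {'id': str, 'family_id': str, 'country': str}
--     acumulados de todas as queries independentes.
--
--     Para cada família, mantém apenas o melhor representante segundo
--     COUNTRY_PRIORITY (US > EP > WO > GB > ...).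
--     Patentes sem family_id são mantidas individualmente.
--
--     Devolve uma lista de strings de IDs prontas para a Fase 2.
--     """
--     family_map = {}   # family_id -> melhor registo até agora
--     no_family  = {}   # patent_id -> True (sem family_id, deduplica por ID)
--
--     for rec in id_records:
--         fam_id  = rec.get('family_id', '').strip()
--         pat_id  = rec.get('id', '')
--         country = rec.get('country', '')
--
--         if not fam_id:
--             # Sem família — mantém mas evita duplicados de ID puro
--             if pat_id:
--                 no_family[pat_id] = True
--             continue
--
--         if fam_id not in family_map:
--             family_map[fam_id] = rec
--         else:
--             # Compara prioridade de país
--             existing_score = COUNTRY_PRIORITY.get(family_map[fam_id]['country'], 99)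
--             new_score      = COUNTRY_PRIORITY.get(country, 99)
--             if new_score < existing_score:
--                 family_map[fam_id] = rec
--
--     result = [rec['id'] for rec in family_map.values()] + list(no_family.keys())
--     return result
-- ===== SOURCE B (Python) =====
-- COUNTRY_PRIORITY = {
--     'US': 1, 'EP': 2, 'WO': 3, 'GB': 4,
--     'AU': 5, 'CA': 6, 'NZ': 7, 'IE': 8,
-- }
--
-- def _deduplicate_by_family(id_records: list) -> list:
--     """Bucket records per family, then pick each bucket's best-country
--     representative with min() (first minimal wins, as Python's min does)."""
--     groups = {}        # family_id -> list of its records, in arrival order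
--     no_family = []     # ids without a family, first-seen order, deduped
--     for rec in id_records:
--         fam_id = rec.get('family_id', '').strip()
--         if fam_id:
--             groups.setdefault(fam_id, []).append(rec)
--         else:
--             pat_id = rec.get('id', '')
--             if pat_id and pat_id not in no_family:
--                 no_family.append(pat_id)
--     best_ids = [
--         min(recs, key=lambda r: COUNTRY_PRIORITY.get(r.get('country', ''), 99))['id']
--         for recs in groups.values()
--     ]
--     return best_ids + no_family
-- ===== Notes on version B (the rewrite author's own statement) =====
-- stated objective: alternative
-- what changed: A streams records keeping a best-so-far representative per family in one dict; B buckets all records per family first and then reduces each bucket with min(key=country priority), keeping the no-family ids in a plain deduped list.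
-- outside the precondition, e.g. on _deduplicate_by_family([{'family_id': 'F', 'id': 'X'}]): A returns ['X'], B returns ['X']
import Mathlib
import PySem

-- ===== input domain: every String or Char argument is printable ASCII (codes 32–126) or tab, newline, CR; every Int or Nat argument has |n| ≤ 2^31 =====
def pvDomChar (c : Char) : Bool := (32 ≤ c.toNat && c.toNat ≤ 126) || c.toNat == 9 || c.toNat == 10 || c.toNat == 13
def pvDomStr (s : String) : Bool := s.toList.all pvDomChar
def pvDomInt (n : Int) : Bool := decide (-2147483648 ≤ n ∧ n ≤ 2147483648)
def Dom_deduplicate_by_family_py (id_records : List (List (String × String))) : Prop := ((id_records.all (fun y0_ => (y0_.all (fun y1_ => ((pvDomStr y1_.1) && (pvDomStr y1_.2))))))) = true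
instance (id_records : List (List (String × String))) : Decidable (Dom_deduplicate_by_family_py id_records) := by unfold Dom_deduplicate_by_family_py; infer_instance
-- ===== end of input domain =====

-- B buckets records per family and reduces each bucket with first-minimal min(), instead of A's streaming best-so-far dict; return values proved equal on Pre_.


-- ===== PORT A =====
-- Shared record helpers (both Pythons receive each record as a dict built from the
-- key/value pairs; dict construction keeps the LAST value of a duplicated key, so
-- lookup returns the last matching value — exact for `rec.get(k, d)`).
def pvRecGetD (r : List (String × String)) (k d : String) : String :=
  r.foldl (fun acc p => if p.1 = k then p.2 else acc) d

-- `k in rec` / subscript availability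
def pvRecHas (r : List (String × String)) (k : String) : Bool :=
  r.any (fun p => p.1 = k)

-- COUNTRY_PRIORITY.get(c, 99)
def pvPrio (c : String) : Int :=
  if c = "US" then 1 else if c = "EP" then 2 else if c = "WO" then 3
  else if c = "GB" then 4 else if c = "AU" then 5 else if c = "CA" then 6
  else if c = "NZ" then 7 else if c = "IE" then 8 else 99

-- one iteration of A's loop; `family_map[fam_id]['country']` and the final
-- `rec['id']` are ported with pvRecGetD (exact under Pre_, which guarantees the key)
def pvAStep (st : PySem.Dict String (List (String × String)) × PySem.Dict String Bool)
    (rec : List (String × String)) :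
    PySem.Dict String (List (String × String)) × PySem.Dict String Bool :=
  let famId := PySem.Str.strip (pvRecGetD rec "family_id" "")
  let patId := pvRecGetD rec "id" ""
  let country := pvRecGetD rec "country" ""
  if famId = "" then
    (st.1, if patId ≠ "" then st.2.insert patId true else st.2)
  else if st.1.contains famId = false then
    (st.1.insert famId rec, st.2)
  else
    let existing := (st.1.get? famId).getD []
    if pvPrio country < pvPrio (pvRecGetD existing "country" "") then
      (st.1.insert famId rec, st.2)
    else st

def deduplicate_by_family_py (id_records : List (List (String × String))) : List String :=
  let st := id_records.foldl pvAStep (PySem.Dict.empty, PySem.Dict.empty)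
  st.1.values.map (fun rec => pvRecGetD rec "id" "") ++ st.2.keys

-- ===== PORT B =====
-- first pass: bucket by family / collect deduped no-family ids
def pvBStep (st : PySem.Dict String (List (List (String × String))) × List String)
    (rec : List (String × String)) :
    PySem.Dict String (List (List (String × String))) × List String :=
  let famId := PySem.Str.strip (pvRecGetD rec "family_id" "")
  if famId ≠ "" then
    (st.1.modify famId [] (· ++ [rec]), st.2)
  else
    let patId := pvRecGetD rec "id" ""
    if patId ≠ "" ∧ patId ∉ st.2 then (st.1, st.2 ++ [patId]) else st

-- exact port of `min(recs, key=lambda r: COUNTRY_PRIORITY.get(r.get('country',''),99))`: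
-- Python's min keeps the FIRST element of minimal key ([] case unreachable: buckets are non-empty)
def pvMinRec (recs : List (List (String × String))) : List (String × String) :=
  match recs with
  | [] => []
  | r :: t => t.foldl (fun best x =>
      if pvPrio (pvRecGetD x "country" "") < pvPrio (pvRecGetD best "country" "") then x else best) r

def deduplicate_by_family_py_alt (id_records : List (List (String × String))) : List String :=
  let st := id_records.foldl pvBStep (PySem.Dict.empty, [])
  st.1.values.map (fun recs => pvRecGetD (pvMinRec recs) "id" "") ++ st.2

-- ===== PRECONDITION & SPEC =====
-- Pre_ excludes inputs on which a record carrying a (non-empty, stripped) family_id lacks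
-- the 'id' or 'country' key: there Python A can hit a KeyError on `rec['id']` /
-- `family_map[fam_id]['country']` (and B on `best['id']`); on a few such inputs A still
-- returns (the missing key is never subscripted), see the cite in claim.json.
def Pre_deduplicate_by_family_py (id_records : List (List (String × String))) : Prop :=
  ∀ rec ∈ id_records, PySem.Str.strip (pvRecGetD rec "family_id" "") ≠ "" →
    pvRecHas rec "id" = true ∧ pvRecHas rec "country" = true
instance (id_records : List (List (String × String))) : Decidable (Pre_deduplicate_by_family_py id_records) := by unfold Pre_deduplicate_by_family_py; infer_instance

def pvWitness_deduplicate_by_family_py : (List (List (String × String))) :=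
  [[("family_id", "F1"), ("id", "US1"), ("country", "US")],
   [("family_id", " F1 "), ("id", "EP1"), ("country", "EP")],
   [("id", "X")]]

def Spec_deduplicate_by_family_py (id_records : List (List (String × String))) (out : List String) : Prop := out = deduplicate_by_family_py_alt id_records
instance (id_records : List (List (String × String))) (out : List String) : Decidable (Spec_deduplicate_by_family_py id_records out) := by unfold Spec_deduplicate_by_family_py; infer_instance

-- ===== CLAIM (what is proved, stated in full; the proofs are below) =====
def Claim_equal_deduplicate_by_family_py : Prop := ∀ (id_records : List (List (String × String))), Dom_deduplicate_by_family_py id_records → Pre_deduplicate_by_family_py id_records → Spec_deduplicate_by_family_py id_records (deduplicate_by_family_py id_records)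

-- ===== LEMMAS AND PROOFS =====

-- the invariant linking A's state to B's state after any prefix of the input
def pvInv (sA : PySem.Dict String (List (String × String)) × PySem.Dict String Bool)
    (sB : PySem.Dict String (List (List (String × String))) × List String) : Prop :=
  sA.1.keys.Nodup ∧ sB.1.keys.Nodup ∧
  sA.1.items = sB.1.items.map (fun p => (p.1, pvMinRec p.2)) ∧
  (∀ p ∈ sB.1.items, p.2 ≠ []) ∧
  sA.2.keys = sB.2

lemma pvMinRec_append (rs : List (List (String × String))) (x : List (String × String))
    (h : rs ≠ []) :
    pvMinRec (rs ++ [x]) =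
      if pvPrio (pvRecGetD x "country" "") < pvPrio (pvRecGetD (pvMinRec rs) "country" "") then x
      else pvMinRec rs := by
  cases rs with
  | nil => exact absurd rfl h
  | cons r t => simp [pvMinRec, List.foldl_append]

-- in a dict with Nodup keys, an item is determined by its key
lemma pvItems_key_unique {ν : Type} (d : PySem.Dict String ν) (hnd : d.keys.Nodup)
    {p q : String × ν} (hp : p ∈ d.items) (hq : q ∈ d.items) (hk : p.1 = q.1) : p = q := by
  obtain ⟨pk, pv⟩ := p
  obtain ⟨qk, qv⟩ := q
  simp only at hk
  subst hk
  have h1 := PySem.Dict.get?_of_mem_items d hp hnd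
  have h2 := PySem.Dict.get?_of_mem_items d hq hnd
  rw [h1] at h2
  exact Prod.ext rfl (by injection h2)

lemma pvAStep_nofam (sA : PySem.Dict String (List (String × String)) × PySem.Dict String Bool)
    (rec : List (String × String)) (hf : PySem.Str.strip (pvRecGetD rec "family_id" "") = "") :
    pvAStep sA rec = (sA.1, if pvRecGetD rec "id" "" ≠ "" then sA.2.insert (pvRecGetD rec "id" "") true else sA.2) := by
  simp [pvAStep, hf]

lemma pvBStep_nofam (sB : PySem.Dict String (List (List (String × String))) × List String)
    (rec : List (String × String)) (hf : PySem.Str.strip (pvRecGetD rec "family_id" "") = "") :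
    pvBStep sB rec = if pvRecGetD rec "id" "" ≠ "" ∧ pvRecGetD rec "id" "" ∉ sB.2
      then (sB.1, sB.2 ++ [pvRecGetD rec "id" ""]) else sB := by
  simp only [pvBStep, hf, ne_eq, not_true_eq_false, if_false]

lemma pvAStep_fam (sA : PySem.Dict String (List (String × String)) × PySem.Dict String Bool)
    (rec : List (String × String)) (hf : ¬ PySem.Str.strip (pvRecGetD rec "family_id" "") = "") :
    pvAStep sA rec =
      (if sA.1.contains (PySem.Str.strip (pvRecGetD rec "family_id" "")) = false then
        (sA.1.insert (PySem.Str.strip (pvRecGetD rec "family_id" "")) rec, sA.2)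
      else if pvPrio (pvRecGetD rec "country" "") <
          pvPrio (pvRecGetD ((sA.1.get? (PySem.Str.strip (pvRecGetD rec "family_id" ""))).getD []) "country" "") then
        (sA.1.insert (PySem.Str.strip (pvRecGetD rec "family_id" "")) rec, sA.2)
      else sA) := by
  simp only [pvAStep, hf, if_false]

lemma pvBStep_fam (sB : PySem.Dict String (List (List (String × String))) × List String)
    (rec : List (String × String)) (hf : ¬ PySem.Str.strip (pvRecGetD rec "family_id" "") = "") :
    pvBStep sB rec =
      (sB.1.insert (PySem.Str.strip (pvRecGetD rec "family_id" ""))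
        (sB.1.getD (PySem.Str.strip (pvRecGetD rec "family_id" "")) [] ++ [rec]), sB.2) := by
  simp only [pvBStep, ne_eq, hf, not_false_eq_true, if_true]
  rfl

lemma pvInv_step (sA : PySem.Dict String (List (String × String)) × PySem.Dict String Bool)
    (sB : PySem.Dict String (List (List (String × String))) × List String)
    (rec : List (String × String)) (h : pvInv sA sB) :
    pvInv (pvAStep sA rec) (pvBStep sB rec) := by
  obtain ⟨hA, hB, hit, hne, hnf⟩ := h
  have hkeys : sA.1.keys = sB.1.keys := by
    simp only [PySem.Dict.keys, hit, List.map_map]; rfl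
  have hcont : ∀ k, sA.1.contains k = sB.1.contains k := by
    intro k
    rw [PySem.Dict.contains_eq_decide_mem_keys, PySem.Dict.contains_eq_decide_mem_keys, hkeys]
  by_cases hf : PySem.Str.strip (pvRecGetD rec "family_id" "") = ""
  · -- no-family branch
    rw [pvAStep_nofam sA rec hf, pvBStep_nofam sB rec hf]
    by_cases hp : pvRecGetD rec "id" "" = ""
    · simp only [hp, ne_eq, not_true_eq_false, false_and, if_false]
      exact ⟨hA, hB, hit, hne, hnf⟩
    · rw [if_pos hp]
      by_cases hm : pvRecGetD rec "id" "" ∈ sB.2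
      · have hc : sA.2.contains (pvRecGetD rec "id" "") = true := by
          rw [PySem.Dict.contains_eq_decide_mem_keys, hnf]; simpa using hm
        rw [if_neg (by simp [hm])]
        exact ⟨hA, hB, hit, hne, by rw [PySem.Dict.keys_insert_of_contains _ _ hc, hnf]⟩
      · have hc : sA.2.contains (pvRecGetD rec "id" "") = false := by
          rw [PySem.Dict.contains_eq_decide_mem_keys, hnf]; simpa using hm
        rw [if_pos ⟨hp, hm⟩]
        exact ⟨hA, hB, hit, hne, by rw [PySem.Dict.keys_insert_of_not_contains _ _ hc, hnf]⟩
  · -- family branch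
    rw [pvAStep_fam sA rec hf, pvBStep_fam sB rec hf]
    set f := PySem.Str.strip (pvRecGetD rec "family_id" "") with hfdef
    by_cases hc : sB.1.contains f = true
    · -- existing family
      obtain ⟨rs, hrs⟩ : ∃ rs, sB.1.get? f = some rs := by
        have := PySem.Dict.contains_eq_isSome_get? sB.1 f
        rw [hc] at this
        exact Option.isSome_iff_exists.mp this.symm
      have hmem : (f, rs) ∈ sB.1.items := PySem.Dict.mem_items_of_get?_eq_some sB.1 hrs
      have hrsne : rs ≠ [] := hne _ hmem
      have hmemA : (f, pvMinRec rs) ∈ sA.1.items := by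
        rw [hit]
        exact List.mem_map_of_mem hmem
      have hgA : sA.1.get? f = some (pvMinRec rs) := PySem.Dict.get?_of_mem_items sA.1 hmemA hA
      have hcA : sA.1.contains f = true := by rw [hcont, hc]
      rw [if_neg (by simp [hcA]), hgA, PySem.Dict.getD_of_get?_eq_some sB.1 [] hrs]
      have hminapp := pvMinRec_append rs rec hrsne
      have hitB : (sB.1.insert f (rs ++ [rec])).items
          = sB.1.items.map (fun p => if (p.1 == f) = true then (f, rs ++ [rec]) else p) :=
        PySem.Dict.items_insert_of_contains sB.1 _ hc
      by_cases hcond : pvPrio (pvRecGetD rec "country" "") < pvPrio (pvRecGetD (Option.getD (some (pvMinRec rs)) []) "country" "")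
      · rw [if_pos hcond]
        refine ⟨PySem.Dict.nodup_keys_insert _ _ _ hA, PySem.Dict.nodup_keys_insert _ _ _ hB, ?_, ?_, hnf⟩
        · rw [PySem.Dict.items_insert_of_contains sA.1 _ hcA, hitB, hit, List.map_map, List.map_map]
          apply List.map_congr_left
          intro p _
          by_cases hk : p.1 = f
          · simp only [Option.getD] at hcond
            simp [hk, hminapp, hcond]
          · simp [hk]
        · intro p hp
          rcases (PySem.Dict.mem_items_insert sB.1 f (rs ++ [rec]) p).mp hp with hpe | ⟨hpm, -⟩
          · subst hpe; simp
          · exact hne _ hpm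
      · rw [if_neg hcond]
        refine ⟨hA, PySem.Dict.nodup_keys_insert _ _ _ hB, ?_, ?_, hnf⟩
        · rw [hitB, hit, List.map_map]
          symm
          apply List.map_congr_left
          intro p hp
          by_cases hk : p.1 = f
          · have hpe : p = (f, rs) := pvItems_key_unique sB.1 hB hp hmem hk
            subst hpe
            simp only [Option.getD] at hcond
            simp [hminapp, hcond]
          · simp [hk]
        · intro p hp
          rcases (PySem.Dict.mem_items_insert sB.1 f (rs ++ [rec]) p).mp hp with hpe | ⟨hpm, -⟩
          · subst hpe; simp
          · exact hne _ hpm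
    · -- new family
      have hcB : sB.1.contains f = false := by simpa using hc
      have hcA : sA.1.contains f = false := by rw [hcont, hcB]
      rw [if_pos (by simp [hcA]), PySem.Dict.getD_of_not_contains sB.1 [] hcB]
      refine ⟨PySem.Dict.nodup_keys_insert _ _ _ hA, PySem.Dict.nodup_keys_insert _ _ _ hB, ?_, ?_, hnf⟩
      · rw [PySem.Dict.items_insert_of_not_contains sA.1 _ hcA,
          PySem.Dict.items_insert_of_not_contains sB.1 _ hcB, List.map_append, hit]
        rfl
      · intro p hp
        rcases (PySem.Dict.mem_items_insert sB.1 f ([] ++ [rec]) p).mp hp with hpe | ⟨hpm, -⟩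
        · subst hpe; simp
        · exact hne _ hpm

lemma pvInv_foldl (recs : List (List (String × String)))
    (sA : PySem.Dict String (List (String × String)) × PySem.Dict String Bool)
    (sB : PySem.Dict String (List (List (String × String))) × List String)
    (h : pvInv sA sB) :
    pvInv (recs.foldl pvAStep sA) (recs.foldl pvBStep sB) := by
  induction recs generalizing sA sB with
  | nil => exact h
  | cons r t ih => exact ih _ _ (pvInv_step _ _ _ h)

-- ===== VERDICT (by name: the statement is the Claim_ definition above) =====
theorem deduplicate_by_family_py_spec : Claim_equal_deduplicate_by_family_py := by
  intro id_records _ _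
  unfold Spec_deduplicate_by_family_py deduplicate_by_family_py deduplicate_by_family_py_alt
  have h := pvInv_foldl id_records (PySem.Dict.empty, PySem.Dict.empty) (PySem.Dict.empty, [])
    (by refine ⟨?_, ?_, ?_, ?_, ?_⟩ <;> simp [PySem.Dict.empty, PySem.Dict.keys])
  obtain ⟨-, -, hitems, -, hnf⟩ := h
  simp only [PySem.Dict.values, hitems, hnf, List.map_map]
  rfl
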